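-- pv_equiv track=rewrite | github.com/Uvoi/steganography | backend/integrations/LSB_in_DCT/jpeg/prepare.py | find_positions_in_dct_limited
-- ===== SOURCE A (Python) =====
-- def find_positions_in_dct_limited(alphabet_mapping, dct_matrices, max_positions_per_char=10):
--     """
--     Ищет позиции (comp_idx, i, j) для каждого значения val = alphabet_mapping[char].
--     Но для каждого char сохраняет только первые max_positions_per_char в списке.
--
--     :param alphabet_mapping: dict { char: val }, где val - значение коэффициента
--     :param dct_matrices: список/итерируемое с DCT-матрицами (jpeg.coef_arrays)
--     :param max_positions_per_char: int, сколько максимум позиций хранить на букву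
--     :return: dict { char: [ (comp_idx, i, j), ... ] } - для каждой буквы до max_positions_per_char позиций
--     """
--     # Готовим словарь списков
--     positions = {char: [] for char in alphabet_mapping}
--
--     # Для удобства проверять, достигли ли мы нужного лимита для всех
--     # будем считать, сколько символов уже набрало max_positions_per_char позиций
--     complete_count = 0
--     total_chars = len(alphabet_mapping)
--
--     # Обход всех коэффициентов
--     # (enumerate(dct_matrices) => comp_idx, matrix)
--     done = False
--     for comp_idx, matrix in enumerate(dct_matrices):
--         if done:
--             break
--         for i, row in enumerate(matrix):
--             if done:
--                 break
--             for j, val in enumerate(row):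
--                 # Перебираем символы и их значения
--                 for char, alpha_val in alphabet_mapping.items():
--                     if val == alpha_val:
--                         # Если для этого char ещё не набрали max_positions_per_char
--                         if len(positions[char]) < max_positions_per_char:
--                             positions[char].append((comp_idx, i, j))
--                             # Если ровно достигли лимита для char, увеличиваем complete_count
--                             if len(positions[char]) == max_positions_per_char:
--                                 complete_count += 1
--                                 # Если все символы собрали по 5 позиций, можно прервать
--                                 if complete_count == total_chars:
--                                     done = True
--                                     break
--                 if done:
--                     break
--     return positions
-- ===== SOURCE B (Python) =====
-- def find_positions_in_dct_limited(alphabet_mapping, dct_matrices, max_positions_per_char=10):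
--     # Flatten the coefficients once, then collect the first positions per char.
--     cells = [(comp_idx, i, j, cell)
--              for comp_idx, matrix in enumerate(dct_matrices)
--              for i, row in enumerate(matrix)
--              for j, cell in enumerate(row)]
--     positions = {}
--     for char, val in alphabet_mapping.items():
--         matches = []
--         for comp_idx, i, j, cell in cells:
--             if len(matches) >= max_positions_per_char:
--                 break
--             if cell == val:
--                 matches.append((comp_idx, i, j))
--         positions[char] = matches
--     return positions
-- ===== Notes on version B (the rewrite author's own statement) =====
-- stated objective: alternative
-- what changed: Replaces A's single coefficient-outer scan with global complete_count/done bookkeeping by a char-outer decomposition: the coefficients are flattened once into a cell list, then each char independently takes its first max_positions_per_char matches in scan order.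
import Mathlib
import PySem

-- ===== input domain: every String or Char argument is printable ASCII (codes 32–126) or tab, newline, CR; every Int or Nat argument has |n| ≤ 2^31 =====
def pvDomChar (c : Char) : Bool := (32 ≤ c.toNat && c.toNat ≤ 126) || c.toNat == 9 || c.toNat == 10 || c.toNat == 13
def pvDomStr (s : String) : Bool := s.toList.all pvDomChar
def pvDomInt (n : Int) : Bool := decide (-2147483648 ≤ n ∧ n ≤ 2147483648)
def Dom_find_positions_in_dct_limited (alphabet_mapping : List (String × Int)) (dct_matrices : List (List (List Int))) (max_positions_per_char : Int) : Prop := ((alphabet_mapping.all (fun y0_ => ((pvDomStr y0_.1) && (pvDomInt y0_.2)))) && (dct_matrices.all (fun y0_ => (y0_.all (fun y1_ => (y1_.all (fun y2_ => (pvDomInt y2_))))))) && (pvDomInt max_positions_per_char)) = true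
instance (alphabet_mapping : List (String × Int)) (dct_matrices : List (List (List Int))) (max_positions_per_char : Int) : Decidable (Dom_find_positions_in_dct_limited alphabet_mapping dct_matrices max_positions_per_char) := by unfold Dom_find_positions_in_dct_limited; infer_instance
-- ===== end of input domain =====

-- B replaces A's coefficient-outer scan with complete_count/done bookkeeping by a char-outer
-- decomposition over the flattened cell list (alternative decomposition, same asymptotic cost).

-- ===== PORT A =====
-- the body of A's innermost 'for char, alpha_val in alphabet_mapping.items()' loop;
-- state = (positions, complete_count, done)
def pvStepChar (maxp total cval : Int) (pos : Int × Int × Int)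
    (s : PySem.Dict String (List (Int × Int × Int)) × Int × Bool) (cv : String × Int) :
    PySem.Dict String (List (Int × Int × Int)) × Int × Bool :=
  if s.2.2 then s             -- 'if done: break' (once done, every later iteration no-ops)
  else if cval = cv.2 then
    let cur := s.1.getD cv.1 []
    if (cur.length : Int) < maxp then
      let newl := cur ++ [pos]
      let d' := s.1.insert cv.1 newl
      if (newl.length : Int) = maxp then
        if s.2.1 + 1 = total then (d', s.2.1 + 1, true) else (d', s.2.1 + 1, s.2.2)
      else (d', s.2.1, s.2.2)
    else s
  else s

def find_positions_in_dct_limited (alphabet_mapping : List (String × Int)) (dct_matrices : List (List (List Int))) (max_positions_per_char : Int) : List (String × List (Int × Int × Int)) :=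
  let items := (PySem.Dict.ofList alphabet_mapping).items
  -- positions = {char: [] for char in alphabet_mapping}
  let positions0 := items.foldl (fun d cv => d.insert cv.1 ([] : List (Int × Int × Int))) PySem.Dict.empty
  let total : Int := (items.length : Int)
  let st :=
    (PySem.List.enumerate dct_matrices 0).foldl (fun s cm =>
      if s.2.2 then s else
      (PySem.List.enumerate cm.2 0).foldl (fun s ir =>
        if s.2.2 then s else
        (PySem.List.enumerate ir.2 0).foldl (fun s jv =>
          if s.2.2 then s else
          items.foldl (pvStepChar max_positions_per_char total jv.2 (cm.1, ir.1, jv.1)) s) s) s)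
      (positions0, (0 : Int), false)
  st.1.items

-- ===== PORT B =====
-- cells = [(comp_idx, i, j, cell) for ...]
def pvCells (dct_matrices : List (List (List Int))) : List (Int × Int × Int × Int) :=
  (PySem.List.enumerate dct_matrices 0).flatMap (fun cm =>
    (PySem.List.enumerate cm.2 0).flatMap (fun ir =>
      (PySem.List.enumerate ir.2 0).map (fun jv => (cm.1, ir.1, jv.1, jv.2))))

-- the per-char scan: break once len(matches) >= max_positions_per_char, append on cell == val
def pvCollect (maxp v : Int) : List (Int × Int × Int × Int) → List (Int × Int × Int) → List (Int × Int × Int)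
  | [], acc => acc
  | c :: rest, acc =>
    if maxp ≤ (acc.length : Int) then acc
    else if c.2.2.2 = v then pvCollect maxp v rest (acc ++ [(c.1, c.2.1, c.2.2.1)])
    else pvCollect maxp v rest acc

def find_positions_in_dct_limited_alt (alphabet_mapping : List (String × Int)) (dct_matrices : List (List (List Int))) (max_positions_per_char : Int) : List (String × List (Int × Int × Int)) :=
  let cells := pvCells dct_matrices
  let d := (PySem.Dict.ofList alphabet_mapping).items.foldl
    (fun d cv => d.insert cv.1 (pvCollect max_positions_per_char cv.2 cells [])) PySem.Dict.empty
  d.items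

-- ===== PRECONDITION & SPEC =====
def Spec_find_positions_in_dct_limited (alphabet_mapping : List (String × Int)) (dct_matrices : List (List (List Int))) (max_positions_per_char : Int) (out : List (String × List (Int × Int × Int))) : Prop := out = find_positions_in_dct_limited_alt alphabet_mapping dct_matrices max_positions_per_char
instance (alphabet_mapping : List (String × Int)) (dct_matrices : List (List (List Int))) (max_positions_per_char : Int) (out : List (String × List (Int × Int × Int))) : Decidable (Spec_find_positions_in_dct_limited alphabet_mapping dct_matrices max_positions_per_char out) := by unfold Spec_find_positions_in_dct_limited; infer_instance

-- ===== CLAIM (what is proved, stated in full; the proofs are below) =====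
def Claim_equal_find_positions_in_dct_limited : Prop := ∀ (alphabet_mapping : List (String × Int)) (dct_matrices : List (List (List Int))) (max_positions_per_char : Int), Dom_find_positions_in_dct_limited alphabet_mapping dct_matrices max_positions_per_char → Spec_find_positions_in_dct_limited alphabet_mapping dct_matrices max_positions_per_char (find_positions_in_dct_limited alphabet_mapping dct_matrices max_positions_per_char)

-- ===== LEMMAS AND PROOFS =====

lemma pvCollect_snoc (maxp v : Int) (c : Int × Int × Int × Int) :
    ∀ (p : List (Int × Int × Int × Int)) (acc : List (Int × Int × Int)),
    pvCollect maxp v (p ++ [c]) acc =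
      (if ((pvCollect maxp v p acc).length : Int) < maxp ∧ c.2.2.2 = v
       then pvCollect maxp v p acc ++ [(c.1, c.2.1, c.2.2.1)]
       else pvCollect maxp v p acc) := by
  intro p
  induction p with
  | nil =>
    intro acc
    show pvCollect maxp v [c] acc = _
    simp only [pvCollect]
    by_cases h : maxp ≤ (acc.length : Int)
    · have : ¬ ((acc.length : Int) < maxp) := by omega
      simp [h, this]
    · have : (acc.length : Int) < maxp := by omega
      by_cases hv : c.2.2.2 = v <;> simp [h, hv, this]
  | cons c' rest ih =>
    intro acc
    simp only [List.cons_append, pvCollect]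
    by_cases h : maxp ≤ (acc.length : Int)
    · rw [if_pos h, if_pos h]
      have : ¬ ((acc.length : Int) < maxp) := by omega
      simp [this]
    · rw [if_neg h, if_neg h]
      by_cases hv : c'.2.2.2 = v
      · rw [if_pos hv, if_pos hv, ih]
      · rw [if_neg hv, if_neg hv, ih]

lemma pvReplace (l1 l2 : List (String × List (Int × Int × Int))) (k : String)
    (w v : List (Int × Int × Int))
    (hnd : ((l1 ++ (k, w) :: l2).map Prod.fst).Nodup) :
    (l1 ++ (k, w) :: l2).map (fun q => if q.1 == k then (k, v) else q) = l1 ++ (k, v) :: l2 := by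
  induction l1 with
  | nil =>
    simp only [List.nil_append, List.map_cons, List.map] at hnd ⊢
    rw [List.nodup_cons] at hnd
    simp only [beq_self_eq_true, if_pos]
    refine congrArg _ ?_
    have : ∀ q ∈ l2, (if q.1 == k then ((k, v) : String × List (Int × Int × Int)) else q) = q := by
      intro q hq
      have : q.1 ≠ k := by
        intro e; exact hnd.1 (e ▸ List.mem_map_of_mem hq)
      simp [this]
    rw [List.map_congr_left this]; simp
  | cons a t ih =>
    simp only [List.cons_append, List.map_cons] at hnd ⊢
    rw [List.nodup_cons] at hnd
    have ha : a.1 ≠ k := by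
      intro e
      exact hnd.1 (by simp [e])
    rw [if_neg (by simp [ha]), ih hnd.2]

def pvL (maxp v : Int) (p : List (Int × Int × Int × Int)) : List (Int × Int × Int) :=
  pvCollect maxp v p []
def pvSat (maxp : Int) (p : List (Int × Int × Int × Int)) (cv : String × Int) : Bool :=
  decide (0 < maxp ∧ ((pvL maxp cv.2 p).length : Int) = maxp)
def pvStateOf (items : List (String × Int)) (maxp : Int) (p : List (Int × Int × Int × Int)) :
    PySem.Dict String (List (Int × Int × Int)) × Int × Bool :=
  (PySem.Dict.mk (items.map (fun cv => (cv.1, pvL maxp cv.2 p))),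
   ((items.filter (pvSat maxp p)).length : Int),
   decide (0 < (items.length : Int)) &&
     decide (((items.filter (pvSat maxp p)).length : Int) = (items.length : Int)))
def pvMix (maxp total : Int) (p : List (Int × Int × Int × Int)) (c : Int × Int × Int × Int)
    (pr sf : List (String × Int)) :
    PySem.Dict String (List (Int × Int × Int)) × Int × Bool :=
  (PySem.Dict.mk (pr.map (fun cv => (cv.1, pvL maxp cv.2 (p ++ [c]))) ++
                  sf.map (fun cv => (cv.1, pvL maxp cv.2 p))),
   (((pr.filter (pvSat maxp (p ++ [c]))).length + (sf.filter (pvSat maxp p)).length : Nat) : Int),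
   decide (0 < total) &&
     decide ((((pr.filter (pvSat maxp (p ++ [c]))).length + (sf.filter (pvSat maxp p)).length : Nat) : Int) = total))

lemma pvL_snoc (maxp v : Int) (p : List (Int × Int × Int × Int)) (c : Int × Int × Int × Int) :
    pvL maxp v (p ++ [c]) =
      (if ((pvL maxp v p).length : Int) < maxp ∧ c.2.2.2 = v
       then pvL maxp v p ++ [(c.1, c.2.1, c.2.2.1)]
       else pvL maxp v p) := pvCollect_snoc maxp v c p []
lemma pvL_snoc_of_sat (maxp : Int) (p : List (Int × Int × Int × Int))
    (c : Int × Int × Int × Int) (cv : String × Int) (h : pvSat maxp p cv = true) :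
    pvL maxp cv.2 (p ++ [c]) = pvL maxp cv.2 p := by
  simp only [pvSat, decide_eq_true_eq] at h
  rw [pvL_snoc, if_neg]; omega
lemma pvSat_snoc_of_sat (maxp : Int) (p : List (Int × Int × Int × Int))
    (c : Int × Int × Int × Int) (cv : String × Int) (h : pvSat maxp p cv = true) :
    pvSat maxp (p ++ [c]) cv = true := by
  unfold pvSat at h ⊢
  rw [pvL_snoc_of_sat maxp p c cv h]; exact h
lemma pvStepChar_done (maxp total cval : Int) (pos : Int × Int × Int)
    (s : PySem.Dict String (List (Int × Int × Int)) × Int × Bool) (cv : String × Int)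
    (h : s.2.2 = true) : pvStepChar maxp total cval pos s cv = s := by
  simp [pvStepChar, h]
lemma pvFoldChar_done (maxp total cval : Int) (pos : Int × Int × Int)
    (l : List (String × Int))
    (s : PySem.Dict String (List (Int × Int × Int)) × Int × Bool)
    (h : s.2.2 = true) : l.foldl (pvStepChar maxp total cval pos) s = s := by
  induction l with
  | nil => rfl
  | cons x xs ih => rw [List.foldl_cons, pvStepChar_done maxp total cval pos s x h]; exact ih

-- if saturation count is full, every char is saturated and the mix collapses to the final state
lemma pvMix_full (maxp total : Int) (p : List (Int × Int × Int × Int)) (c : Int × Int × Int × Int)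
    (items pr sf : List (String × Int)) (hi : items = pr ++ sf)
    (htot : total = (items.length : Int))
    (hful : (((pr.filter (pvSat maxp (p ++ [c]))).length + (sf.filter (pvSat maxp p)).length : Nat) : Int) = total) :
    pvMix maxp total p c pr sf = pvStateOf items maxp (p ++ [c]) := by
  subst hi
  have h1 : (pr.filter (pvSat maxp (p ++ [c]))).length ≤ pr.length := pr.length_filter_le _
  have h2 : (sf.filter (pvSat maxp p)).length ≤ sf.length := sf.length_filter_le _
  have hlen : ((pr ++ sf).length : Int) = ((pr.length + sf.length : Nat) : Int) := by simp
  have e1 : (pr.filter (pvSat maxp (p ++ [c]))).length = pr.length := by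
    rw [htot, hlen] at hful; omega
  have e2 : (sf.filter (pvSat maxp p)).length = sf.length := by
    rw [htot, hlen] at hful; omega
  have hsat : ∀ cv ∈ sf, pvSat maxp p cv = true := by
    rw [← List.length_filter_eq_length_iff]; exact e2
  have hmapf : sf.map (fun cv => (cv.1, pvL maxp cv.2 p)) =
      sf.map (fun cv => (cv.1, pvL maxp cv.2 (p ++ [c]))) :=
    List.map_congr_left (fun cv hcv => by rw [pvL_snoc_of_sat maxp p c cv (hsat cv hcv)])
  have hfilt : sf.filter (pvSat maxp p) = sf.filter (pvSat maxp (p ++ [c])) :=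
    List.filter_congr (fun cv hcv => by
      rw [hsat cv hcv, pvSat_snoc_of_sat maxp p c cv (hsat cv hcv)])
  unfold pvMix pvStateOf
  rw [hmapf, hfilt, ← List.map_append]
  refine Prod.ext rfl (Prod.ext ?_ ?_) <;> simp only
  · rw [List.filter_append]; push_cast [List.length_append]; ring
  · have hsum : ((List.filter (pvSat maxp (p ++ [c])) pr).length +
        (List.filter (pvSat maxp (p ++ [c])) sf).length : Nat) = (pr ++ sf).length := by
      rw [htot] at hful; rw [← hfilt]; push_cast [List.length_append] at hful ⊢; omega
    rw [htot, List.filter_append]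
    simp [List.length_append, hsum]

lemma pvCharFold (maxp total : Int) (c : Int × Int × Int × Int)
    (p : List (Int × Int × Int × Int)) (items : List (String × Int))
    (hnd : (items.map Prod.fst).Nodup) (htot : total = (items.length : Int)) :
    ∀ (sf pr : List (String × Int)), items = pr ++ sf →
    sf.foldl (pvStepChar maxp total c.2.2.2 (c.1, c.2.1, c.2.2.1)) (pvMix maxp total p c pr sf)
      = pvStateOf items maxp (p ++ [c]) := by
  intro sf
  induction sf with
  | nil =>
    intro pr h
    rw [List.append_nil] at h
    subst h
    rw [List.foldl_nil]
    unfold pvMix pvStateOf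
    rw [htot]
    simp
    rfl
  | cons cv sf2 ih =>
    intro pr h
    rw [List.foldl_cons]
    by_cases hflag : (pvMix maxp total p c pr (cv :: sf2)).2.2 = true
    · rw [pvStepChar_done _ _ _ _ _ _ hflag, pvFoldChar_done _ _ _ _ _ _ hflag]
      refine pvMix_full maxp total p c items pr (cv :: sf2) h htot ?_
      have := hflag
      unfold pvMix at this
      simp only [Bool.and_eq_true, decide_eq_true_eq] at this
      exact this.2
    · -- the running flag is false: execute one step of the char loop
      have hflag' : (pvMix maxp total p c pr (cv :: sf2)).2.2 = false := by
        simp [hflag]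
      -- the dictionary inside the mix
      have hitems_eq :
          (pvMix maxp total p c pr (cv :: sf2)).1.items =
          pr.map (fun cv => (cv.1, pvL maxp cv.2 (p ++ [c]))) ++
            (cv.1, pvL maxp cv.2 p) :: sf2.map (fun cv => (cv.1, pvL maxp cv.2 p)) := by
        unfold pvMix; simp
      have hkeys :
          ((pr.map (fun cv => (cv.1, pvL maxp cv.2 (p ++ [c]))) ++
            (cv.1, pvL maxp cv.2 p) :: sf2.map (fun cv => (cv.1, pvL maxp cv.2 p))).map Prod.fst)
          = items.map Prod.fst := by
        subst h; simp only [List.map_append, List.map_cons, List.map_map]; rfl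
      have hknd :
          ((pr.map (fun cv => (cv.1, pvL maxp cv.2 (p ++ [c]))) ++
            (cv.1, pvL maxp cv.2 p) :: sf2.map (fun cv => (cv.1, pvL maxp cv.2 p))).map Prod.fst).Nodup := by
        rw [hkeys]; exact hnd
      have hgetD : (pvMix maxp total p c pr (cv :: sf2)).1.getD cv.1 [] = pvL maxp cv.2 p := by
        apply PySem.Dict.getD_of_mem_items
        · rw [hitems_eq]; simp
        · show ((pvMix maxp total p c pr (cv :: sf2)).1.items.map Prod.fst).Nodup
          rw [hitems_eq]; exact hknd
      -- explicit tuple form of the mix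
      have hmix : pvMix maxp total p c pr (cv :: sf2) =
          (PySem.Dict.mk (pr.map (fun cv => (cv.1, pvL maxp cv.2 (p ++ [c]))) ++
              (cv.1, pvL maxp cv.2 p) :: sf2.map (fun cv => (cv.1, pvL maxp cv.2 p))),
           (((pr.filter (pvSat maxp (p ++ [c]))).length +
             ((cv :: sf2).filter (pvSat maxp p)).length : Nat) : Int),
           false) := by
        refine Prod.ext ?_ (Prod.ext ?_ ?_)
        · exact PySem.Dict.ext hitems_eq
        · rfl
        · exact hflag'
      rw [hmix] at hgetD
      rw [hmix]
      have hflagE : (decide (0 < total) &&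
          decide ((((pr.filter (pvSat maxp (p ++ [c]))).length +
            ((cv :: sf2).filter (pvSat maxp p)).length : Nat) : Int) = total)) = false := hflag'
      have hparts : items = (pr ++ [cv]) ++ sf2 := by rw [h]; simp
      -- one-step no-op helper: the state is already the (pr ++ [cv]) mix
      have hbase : ∀ X, X = pvMix maxp total p c (pr ++ [cv]) sf2 →
          List.foldl (pvStepChar maxp total c.2.2.2 (c.1, c.2.1, c.2.2.1)) X sf2 =
            pvStateOf items maxp (p ++ [c]) := by
        intro X hX; rw [hX]; exact ih (pr ++ [cv]) hparts
      by_cases hv : c.2.2.2 = cv.2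
      · by_cases hlen : ((pvL maxp cv.2 p).length : Int) < maxp
        · -- the cell is appended to cv's list
          have hL : pvL maxp cv.2 (p ++ [c]) = pvL maxp cv.2 p ++ [(c.1, c.2.1, c.2.2.1)] := by
            rw [pvL_snoc, if_pos ⟨hlen, hv⟩]
          have hsatold : pvSat maxp p cv = false := by
            simp only [pvSat, decide_eq_false_iff_not]; rintro ⟨h1, h2⟩; omega
          have hins : (PySem.Dict.mk (pr.map (fun cv => (cv.1, pvL maxp cv.2 (p ++ [c]))) ++
                (cv.1, pvL maxp cv.2 p) :: sf2.map (fun cv => (cv.1, pvL maxp cv.2 p)))).insert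
                cv.1 (pvL maxp cv.2 p ++ [(c.1, c.2.1, c.2.2.1)]) =
              PySem.Dict.mk ((pr ++ [cv]).map (fun cv => (cv.1, pvL maxp cv.2 (p ++ [c]))) ++
                sf2.map (fun cv => (cv.1, pvL maxp cv.2 p))) := by
            apply PySem.Dict.ext
            rw [PySem.Dict.items_insert_of_contains]
            · show (pr.map (fun cv => (cv.1, pvL maxp cv.2 (p ++ [c]))) ++
                  (cv.1, pvL maxp cv.2 p) :: sf2.map (fun cv => (cv.1, pvL maxp cv.2 p))).map
                    (fun q => if q.1 == cv.1 then (cv.1, pvL maxp cv.2 p ++ [(c.1, c.2.1, c.2.2.1)]) else q) = _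
              rw [pvReplace _ _ _ _ _ hknd, ← hL]
              simp [List.map_append]
            · rw [PySem.Dict.contains_iff_mem_keys]
              show cv.1 ∈ (pr.map (fun cv => (cv.1, pvL maxp cv.2 (p ++ [c]))) ++
                (cv.1, pvL maxp cv.2 p) :: sf2.map (fun cv => (cv.1, pvL maxp cv.2 p))).map Prod.fst
              simp
          by_cases hmax : (((pvL maxp cv.2 p ++ [(c.1, c.2.1, c.2.2.1)]).length : Nat) : Int) = maxp
          · have hsatnew : pvSat maxp (p ++ [c]) cv = true := by
              simp only [pvSat, hL, decide_eq_true_eq]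
              push_cast at hmax ⊢
              constructor <;> omega
            have hcnt1 : ((pr ++ [cv]).filter (pvSat maxp (p ++ [c]))).length +
                (sf2.filter (pvSat maxp p)).length =
                ((pr.filter (pvSat maxp (p ++ [c]))).length +
                 ((cv :: sf2).filter (pvSat maxp p)).length) + 1 := by
              simp only [List.filter_append, List.filter_cons, hsatold, hsatnew]
              simp; omega
            by_cases htt : (((pr.filter (pvSat maxp (p ++ [c]))).length +
                ((cv :: sf2).filter (pvSat maxp p)).length : Nat) : Int) + 1 = total
            · have hstep : pvStepChar maxp total c.2.2.2 (c.1, c.2.1, c.2.2.1)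
                  (PySem.Dict.mk (pr.map (fun cv => (cv.1, pvL maxp cv.2 (p ++ [c]))) ++
                    (cv.1, pvL maxp cv.2 p) :: sf2.map (fun cv => (cv.1, pvL maxp cv.2 p))),
                   (((pr.filter (pvSat maxp (p ++ [c]))).length +
                     ((cv :: sf2).filter (pvSat maxp p)).length : Nat) : Int), false) cv =
                  pvMix maxp total p c (pr ++ [cv]) sf2 := by
                simp only [pvStepChar, hgetD]
                rw [if_neg (by simp), if_pos hv, if_pos hlen, if_pos hmax, if_pos htt]
                unfold pvMix
                refine Prod.ext ?_ (Prod.ext ?_ ?_)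
                · exact hins
                · show _ = ((((pr ++ [cv]).filter (pvSat maxp (p ++ [c]))).length +
                    (sf2.filter (pvSat maxp p)).length : Nat) : Int)
                  rw [hcnt1]; push_cast; ring
                · show _ = (decide (0 < total) &&
                    decide (((((pr ++ [cv]).filter (pvSat maxp (p ++ [c]))).length +
                      (sf2.filter (pvSat maxp p)).length : Nat) : Int) = total))
                  rw [hcnt1]
                  have e : ((((pr.filter (pvSat maxp (p ++ [c]))).length +
                      ((cv :: sf2).filter (pvSat maxp p)).length) + 1 : Nat) : Int) = total := by
                    push_cast at htt ⊢; omega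
                  have h0 : 0 < total := by push_cast at e; omega
                  rw [e]
                  simp [h0]
              rw [hstep]; exact hbase _ rfl
            · have hstep : pvStepChar maxp total c.2.2.2 (c.1, c.2.1, c.2.2.1)
                  (PySem.Dict.mk (pr.map (fun cv => (cv.1, pvL maxp cv.2 (p ++ [c]))) ++
                    (cv.1, pvL maxp cv.2 p) :: sf2.map (fun cv => (cv.1, pvL maxp cv.2 p))),
                   (((pr.filter (pvSat maxp (p ++ [c]))).length +
                     ((cv :: sf2).filter (pvSat maxp p)).length : Nat) : Int), false) cv =
                  pvMix maxp total p c (pr ++ [cv]) sf2 := by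
                simp only [pvStepChar, hgetD]
                rw [if_neg (by simp), if_pos hv, if_pos hlen, if_pos hmax, if_neg htt]
                unfold pvMix
                refine Prod.ext ?_ (Prod.ext ?_ ?_)
                · exact hins
                · show _ = ((((pr ++ [cv]).filter (pvSat maxp (p ++ [c]))).length +
                    (sf2.filter (pvSat maxp p)).length : Nat) : Int)
                  rw [hcnt1]; push_cast; ring
                · show _ = (decide (0 < total) &&
                    decide (((((pr ++ [cv]).filter (pvSat maxp (p ++ [c]))).length +
                      (sf2.filter (pvSat maxp p)).length : Nat) : Int) = total))
                  rw [hcnt1]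
                  have e : ¬ (((((pr.filter (pvSat maxp (p ++ [c]))).length +
                      ((cv :: sf2).filter (pvSat maxp p)).length) + 1 : Nat) : Int) = total) := by
                    push_cast at htt ⊢; omega
                  symm
                  rw [Bool.and_eq_false_iff]
                  right
                  simp only [decide_eq_false_iff_not]
                  exact e
              rw [hstep]; exact hbase _ rfl
          · -- appended but the limit is not reached yet
            have hsatnew : pvSat maxp (p ++ [c]) cv = false := by
              simp only [pvSat, hL, decide_eq_false_iff_not]
              rintro ⟨h1, h2⟩
              exact hmax h2
            have hcnt0 : (((pr ++ [cv]).filter (pvSat maxp (p ++ [c]))).length +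
                (sf2.filter (pvSat maxp p)).length : Nat) =
                ((pr.filter (pvSat maxp (p ++ [c]))).length +
                 ((cv :: sf2).filter (pvSat maxp p)).length : Nat) := by
              simp only [List.filter_append, List.filter_cons, hsatold, hsatnew]
              simp
            have hstep : pvStepChar maxp total c.2.2.2 (c.1, c.2.1, c.2.2.1)
                  (PySem.Dict.mk (pr.map (fun cv => (cv.1, pvL maxp cv.2 (p ++ [c]))) ++
                    (cv.1, pvL maxp cv.2 p) :: sf2.map (fun cv => (cv.1, pvL maxp cv.2 p))),
                   (((pr.filter (pvSat maxp (p ++ [c]))).length +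
                     ((cv :: sf2).filter (pvSat maxp p)).length : Nat) : Int), false) cv =
                  pvMix maxp total p c (pr ++ [cv]) sf2 := by
              simp only [pvStepChar, hgetD]
              rw [if_neg (by simp), if_pos hv, if_pos hlen, if_neg hmax]
              unfold pvMix
              refine Prod.ext ?_ (Prod.ext ?_ ?_)
              · exact hins
              · show _ = ((((pr ++ [cv]).filter (pvSat maxp (p ++ [c]))).length +
                  (sf2.filter (pvSat maxp p)).length : Nat) : Int)
                rw [hcnt0]
              · show _ = (decide (0 < total) &&
                  decide (((((pr ++ [cv]).filter (pvSat maxp (p ++ [c]))).length +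
                    (sf2.filter (pvSat maxp p)).length : Nat) : Int) = total))
                rw [hcnt0]
                exact hflagE.symm
            rw [hstep]; exact hbase _ rfl
        · -- cv's list is already full: nothing happens
          have hL : pvL maxp cv.2 (p ++ [c]) = pvL maxp cv.2 p := by
            rw [pvL_snoc, if_neg]; rintro ⟨h1, _⟩; exact hlen h1
          have hS : pvSat maxp (p ++ [c]) cv = pvSat maxp p cv := by
            unfold pvSat; rw [hL]
          have hcnt0 : (((pr ++ [cv]).filter (pvSat maxp (p ++ [c]))).length +
              (sf2.filter (pvSat maxp p)).length : Nat) =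
              ((pr.filter (pvSat maxp (p ++ [c]))).length +
               ((cv :: sf2).filter (pvSat maxp p)).length : Nat) := by
            simp only [List.filter_append, List.filter_cons, hS]
            cases pvSat maxp p cv <;> simp <;> omega
          have hstep : pvStepChar maxp total c.2.2.2 (c.1, c.2.1, c.2.2.1)
                  (PySem.Dict.mk (pr.map (fun cv => (cv.1, pvL maxp cv.2 (p ++ [c]))) ++
                    (cv.1, pvL maxp cv.2 p) :: sf2.map (fun cv => (cv.1, pvL maxp cv.2 p))),
                   (((pr.filter (pvSat maxp (p ++ [c]))).length +
                     ((cv :: sf2).filter (pvSat maxp p)).length : Nat) : Int), false) cv =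
                  pvMix maxp total p c (pr ++ [cv]) sf2 := by
                simp only [pvStepChar, hgetD]
                rw [if_neg (by simp), if_pos hv, if_neg hlen]
                unfold pvMix
                refine Prod.ext ?_ (Prod.ext ?_ ?_)
                · apply PySem.Dict.ext
                  show _ = ((pr ++ [cv]).map (fun cv => (cv.1, pvL maxp cv.2 (p ++ [c]))) ++
                    sf2.map (fun cv => (cv.1, pvL maxp cv.2 p)))
                  rw [← hL]
                  simp [List.map_append]
                · show _ = ((((pr ++ [cv]).filter (pvSat maxp (p ++ [c]))).length +
                    (sf2.filter (pvSat maxp p)).length : Nat) : Int)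
                  rw [hcnt0]
                · show _ = (decide (0 < total) &&
                    decide (((((pr ++ [cv]).filter (pvSat maxp (p ++ [c]))).length +
                      (sf2.filter (pvSat maxp p)).length : Nat) : Int) = total))
                  rw [hcnt0]
                  exact hflagE.symm
          rw [hstep]; exact hbase _ rfl
      · -- value mismatch: nothing happens
        have hL : pvL maxp cv.2 (p ++ [c]) = pvL maxp cv.2 p := by
          rw [pvL_snoc, if_neg]; rintro ⟨_, h2⟩; exact hv h2
        have hS : pvSat maxp (p ++ [c]) cv = pvSat maxp p cv := by
          unfold pvSat; rw [hL]
        have hcnt0 : (((pr ++ [cv]).filter (pvSat maxp (p ++ [c]))).length +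
            (sf2.filter (pvSat maxp p)).length : Nat) =
            ((pr.filter (pvSat maxp (p ++ [c]))).length +
             ((cv :: sf2).filter (pvSat maxp p)).length : Nat) := by
          simp only [List.filter_append, List.filter_cons, hS]
          cases pvSat maxp p cv <;> simp <;> omega
        have hstep : pvStepChar maxp total c.2.2.2 (c.1, c.2.1, c.2.2.1)
                (PySem.Dict.mk (pr.map (fun cv => (cv.1, pvL maxp cv.2 (p ++ [c]))) ++
                    (cv.1, pvL maxp cv.2 p) :: sf2.map (fun cv => (cv.1, pvL maxp cv.2 p))),
                   (((pr.filter (pvSat maxp (p ++ [c]))).length +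
                     ((cv :: sf2).filter (pvSat maxp p)).length : Nat) : Int), false) cv =
                pvMix maxp total p c (pr ++ [cv]) sf2 := by
              simp only [pvStepChar, hgetD]
              rw [if_neg (by simp), if_neg hv]
              unfold pvMix
              refine Prod.ext ?_ (Prod.ext ?_ ?_)
              · apply PySem.Dict.ext
                show _ = ((pr ++ [cv]).map (fun cv => (cv.1, pvL maxp cv.2 (p ++ [c]))) ++
                  sf2.map (fun cv => (cv.1, pvL maxp cv.2 p)))
                rw [← hL]
                simp [List.map_append]
              · show _ = ((((pr ++ [cv]).filter (pvSat maxp (p ++ [c]))).length +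
                  (sf2.filter (pvSat maxp p)).length : Nat) : Int)
                rw [hcnt0]
              · show _ = (decide (0 < total) &&
                  decide (((((pr ++ [cv]).filter (pvSat maxp (p ++ [c]))).length +
                    (sf2.filter (pvSat maxp p)).length : Nat) : Int) = total))
                rw [hcnt0]
                exact hflagE.symm
        rw [hstep]; exact hbase _ rfl

lemma pvMix_zero (maxp total : Int) (p : List (Int × Int × Int × Int)) (c : Int × Int × Int × Int)
    (items : List (String × Int)) (htot : total = (items.length : Int)) :
    pvMix maxp total p c [] items = pvStateOf items maxp p := by
  unfold pvMix pvStateOf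
  rw [htot]
  simp
  simp only [Int.zero_add]

lemma pvCellStep_stateOf (maxp total : Int) (items : List (String × Int))
    (hnd : (items.map Prod.fst).Nodup) (htot : total = (items.length : Int))
    (p : List (Int × Int × Int × Int)) (c : Int × Int × Int × Int) :
    (if (pvStateOf items maxp p).2.2 then pvStateOf items maxp p
     else items.foldl (pvStepChar maxp total c.2.2.2 (c.1, c.2.1, c.2.2.1)) (pvStateOf items maxp p))
    = pvStateOf items maxp (p ++ [c]) := by
  by_cases hd : (pvStateOf items maxp p).2.2 = true
  · rw [if_pos hd]
    have hful : (((([] : List (String × Int)).filter (pvSat maxp (p ++ [c]))).length +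
        (items.filter (pvSat maxp p)).length : Nat) : Int) = total := by
      unfold pvStateOf at hd
      simp only [Bool.and_eq_true, decide_eq_true_eq] at hd
      simp only [List.filter_nil, List.length_nil, Nat.zero_add]
      rw [htot]
      exact hd.2
    calc pvStateOf items maxp p = pvMix maxp total p c [] items := (pvMix_zero maxp total p c items htot).symm
      _ = pvStateOf items maxp (p ++ [c]) :=
          pvMix_full maxp total p c items [] items rfl htot hful
  · rw [if_neg hd]
    rw [← pvMix_zero maxp total p c items htot]
    exact pvCharFold maxp total c p items hnd htot items [] rfl

lemma pvCellFold (maxp total : Int) (items : List (String × Int))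
    (hnd : (items.map Prod.fst).Nodup) (htot : total = (items.length : Int)) :
    ∀ (cs p : List (Int × Int × Int × Int)),
    cs.foldl (fun s c =>
        if s.2.2 then s
        else items.foldl (pvStepChar maxp total c.2.2.2 (c.1, c.2.1, c.2.2.1)) s)
      (pvStateOf items maxp p) = pvStateOf items maxp (p ++ cs) := by
  intro cs
  induction cs with
  | nil => intro p; simp
  | cons c cs2 ih =>
    intro p
    rw [List.foldl_cons, pvCellStep_stateOf maxp total items hnd htot p c, ih (p ++ [c])]
    simp

-- guard elimination: every loop body of A no-ops once done is set
lemma pvFoldRow_done (maxp total : Int) (items : List (String × Int)) (row : List (Int × Int))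
    (ci ri : Int) (s : PySem.Dict String (List (Int × Int × Int)) × Int × Bool)
    (h : s.2.2 = true) :
    row.foldl (fun s jv =>
      if s.2.2 then s else items.foldl (pvStepChar maxp total jv.2 (ci, ri, jv.1)) s) s = s := by
  induction row with
  | nil => rfl
  | cons jv rest ih => rw [List.foldl_cons, if_pos h]; exact ih

-- A's nested loops compute the cell-by-cell fold over the flattened coefficient list
lemma pvNested_eq_flat (maxp total : Int) (items : List (String × Int))
    (dct : List (List (List Int)))
    (s : PySem.Dict String (List (Int × Int × Int)) × Int × Bool) :
    (PySem.List.enumerate dct 0).foldl (fun s cm =>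
      if s.2.2 then s else
      (PySem.List.enumerate cm.2 0).foldl (fun s ir =>
        if s.2.2 then s else
        (PySem.List.enumerate ir.2 0).foldl (fun s jv =>
          if s.2.2 then s else
          items.foldl (pvStepChar maxp total jv.2 (cm.1, ir.1, jv.1)) s) s) s) s
    = (pvCells dct).foldl (fun s c =>
        if s.2.2 then s
        else items.foldl (pvStepChar maxp total c.2.2.2 (c.1, c.2.1, c.2.2.1)) s) s := by
  unfold pvCells
  rw [List.foldl_flatMap]
  apply PySem.List.foldl_congr_mem'
  intro cm _ s1
  rw [List.foldl_flatMap]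
  by_cases h1 : s1.2.2 = true
  · rw [if_pos h1]
    symm
    have : ∀ (l : List (Int × List Int)), l.foldl (fun s ir =>
        ((PySem.List.enumerate ir.2 0).map (fun jv => (cm.1, ir.1, jv.1, jv.2))).foldl
          (fun s c => if s.2.2 then s
            else items.foldl (pvStepChar maxp total c.2.2.2 (c.1, c.2.1, c.2.2.1)) s) s) s1 = s1 := by
      intro l
      induction l with
      | nil => rfl
      | cons ir rest ih =>
        rw [List.foldl_cons]
        have : ((PySem.List.enumerate ir.2 0).map (fun jv => (cm.1, ir.1, jv.1, jv.2))).foldl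
            (fun s c => if s.2.2 then s
              else items.foldl (pvStepChar maxp total c.2.2.2 (c.1, c.2.1, c.2.2.1)) s) s1 = s1 := by
          rw [List.foldl_map]
          exact pvFoldRow_done maxp total items _ cm.1 ir.1 s1 h1
        rw [this]; exact ih
    exact this _
  · rw [if_neg h1]
    apply PySem.List.foldl_congr_mem'
    intro ir _ s2
    rw [List.foldl_map]
    by_cases h2 : s2.2.2 = true
    · rw [if_pos h2]
      exact (pvFoldRow_done maxp total items _ cm.1 ir.1 s2 h2).symm
    · rw [if_neg h2]

lemma pvSat_nil (maxp : Int) (cv : String × Int) :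
    pvSat maxp ([] : List (Int × Int × Int × Int)) cv = false := by
  simp only [pvSat, decide_eq_false_iff_not]
  rintro ⟨h1, h2⟩
  simp only [pvL, pvCollect, List.length_nil] at h2
  omega

theorem find_positions_in_dct_limited_spec : Claim_equal_find_positions_in_dct_limited := by
  unfold Claim_equal_find_positions_in_dct_limited
  intro am dct maxp _dom
  unfold Spec_find_positions_in_dct_limited
  have hnd : (((PySem.Dict.ofList am).items).map Prod.fst).Nodup := PySem.Dict.nodup_keys_ofList am
  have hfresh : ∀ cv ∈ (PySem.Dict.ofList am).items,
      (PySem.Dict.empty : PySem.Dict String (List (Int × Int × Int))).contains cv.1 = false :=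
    fun cv _ => PySem.Dict.contains_empty cv.1
  have hfilnil : ((PySem.Dict.ofList am).items.filter (pvSat maxp [])) = [] :=
    List.filter_eq_nil_iff.mpr (fun cv _ => by simp [pvSat_nil])
  have hinit : ((PySem.Dict.ofList am).items.foldl
        (fun d cv => d.insert cv.1 ([] : List (Int × Int × Int))) PySem.Dict.empty,
      (0 : Int), false) = pvStateOf (PySem.Dict.ofList am).items maxp [] := by
    unfold pvStateOf
    refine Prod.ext ?_ (Prod.ext ?_ ?_)
    · apply PySem.Dict.ext
      show ((PySem.Dict.ofList am).items.foldl
          (fun d cv => d.insert cv.1 ([] : List (Int × Int × Int))) PySem.Dict.empty).items =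
        ((PySem.Dict.ofList am).items.map (fun cv => (cv.1, pvL maxp cv.2 [])))
      rw [PySem.Dict.items_foldl_insert_fresh ((PySem.Dict.ofList am).items)
        (fun cv : String × Int => cv.1) (fun _ => ([] : List (Int × Int × Int)))
        PySem.Dict.empty hfresh hnd]
      rfl
    · show (0 : Int) = _
      rw [hfilnil]
      rfl
    · show false = _
      rw [hfilnil]
      symm
      rw [Bool.and_eq_false_iff]
      by_cases hl : (0 : Int) < ((PySem.Dict.ofList am).items.length : Int)
      · right; simp only [List.length_nil, decide_eq_false_iff_not]; push_cast; omega
      · left; simp only [decide_eq_false_iff_not]; exact hl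
  simp only [find_positions_in_dct_limited, find_positions_in_dct_limited_alt]
  rw [pvNested_eq_flat maxp ((PySem.Dict.ofList am).items.length : Int) (PySem.Dict.ofList am).items dct]
  rw [hinit]
  rw [pvCellFold maxp ((PySem.Dict.ofList am).items.length : Int) (PySem.Dict.ofList am).items hnd rfl (pvCells dct) []]
  rw [PySem.Dict.items_foldl_insert_fresh ((PySem.Dict.ofList am).items)
    (fun cv : String × Int => cv.1)
    (fun cv : String × Int => pvCollect maxp cv.2 (pvCells dct) [])
    PySem.Dict.empty hfresh hnd]
  rfl
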